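-- pv_equiv track=rewrite | github.com/AndrewK4758/practice-structy | constVal.py | solve
-- ===== SOURCE A (Python) =====
-- def solve(s):
--     vowels = 'aeiou'
--     for letter in s:
--         if letter in vowels:
--             s = s.replace(letter, '*')
--     consts = s.split('*')
--
--
--     def counts(ele):
--         total = 0
--         max = 0
--         for letter in ele:
--             total += ord(letter) - 96
--             if total > max:
--                 max = total
--         return max
--
--     return max(list(map(counts, consts)))
-- ===== SOURCE B (Python) =====
-- def solve(s):
--     vowels = 'aeiou'
--     best = 0
--     total = 0
--     for ch in s:
--         if ch in vowels:
--             total = 0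
--         else:
--             total += ord(ch) - 96
--             if total > best:
--                 best = total
--     return best
-- ===== Notes on version B (the rewrite author's own statement) =====
-- stated objective: faster
-- what changed: Replaces the replace-all-vowels / split / per-segment-scan / outer-max pipeline by one linear pass that keeps a running letter-value sum reset at each vowel and tracks the maximum.
-- outside the precondition, e.g. on solve('*b'): A returns 2, B returns 0; on solve('b*b'): A returns 2, B returns 2; on solve('*'): A returns 0, B returns 0
import Mathlib
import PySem

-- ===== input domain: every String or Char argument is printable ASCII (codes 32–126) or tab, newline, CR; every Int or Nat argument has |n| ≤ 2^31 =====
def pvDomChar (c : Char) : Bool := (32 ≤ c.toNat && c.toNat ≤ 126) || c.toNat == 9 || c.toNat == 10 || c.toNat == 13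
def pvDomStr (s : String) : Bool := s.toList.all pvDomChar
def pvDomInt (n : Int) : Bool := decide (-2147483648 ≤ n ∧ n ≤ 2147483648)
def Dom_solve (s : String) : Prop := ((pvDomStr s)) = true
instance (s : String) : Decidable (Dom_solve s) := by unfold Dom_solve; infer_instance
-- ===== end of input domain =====

-- B replaces A's replace-all-vowels / split('*') / per-segment-scan / outer-max pipeline
-- by a single linear pass (running sum reset at vowels, tracking the maximum).

-- ===== PORT A =====
-- inner helper `counts`: running total of ord(letter)-96, returning the running maximum
def solveCounts (ele : List Char) : Int :=
  (ele.foldl (fun (st : Int × Int) c =>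
      let total := st.1 + ((c.toNat : Int) - 96)
      (total, if total > st.2 then total else st.2)) (0, 0)).2

def solve (s : String) : Int :=
  let vowels := "aeiou".toList
  -- for letter in s: if letter in vowels: s = s.replace(letter, '*')
  let starred := s.toList.foldl
    (fun cur letter =>
      if PySem.Chars.isIn [letter] vowels then PySem.Chars.replace cur [letter] ['*'] else cur)
    s.toList
  -- consts = s.split('*'); return max(list(map(counts, consts)))
  let consts := PySem.Chars.splitOn starred ['*']
  match PySem.List.max? (consts.map solveCounts) (fun x => x) with
  | some m => m
  | none => 0   -- unreachable: split always yields a nonempty list, so Python's max never raises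

-- ===== PORT B =====
def solve_alt (s : String) : Int :=
  -- state (best, total); vowel resets total, otherwise add ord(ch)-96 and update best
  (s.toList.foldl (fun (st : Int × Int) ch =>
      if PySem.Chars.isIn [ch] "aeiou".toList then (st.1, 0)
      else
        let total := st.2 + ((ch.toNat : Int) - 96)
        (if total > st.1 then total else st.1, total)) (0, 0)).1

-- ===== PRECONDITION & SPEC =====
-- Pre_ excludes strings that already contain '*', A's internal sentinel character: there A
-- accidentally treats the pre-existing '*' as a vowel-like separator, a corner where neither
-- behaviour is specified (both programs still return a value).
def Pre_solve (s : String) : Prop := ¬ '*' ∈ s.toList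
instance (s : String) : Decidable (Pre_solve s) := by unfold Pre_solve; infer_instance

def pvWitness_solve : String := "bcd"

def Spec_solve (s : String) (out : Int) : Prop := out = solve_alt s
instance (s : String) (out : Int) : Decidable (Spec_solve s out) := by unfold Spec_solve; infer_instance

-- ===== CLAIM (what is proved, stated in full; the proofs are below) =====
def Claim_equal_solve : Prop := ∀ (s : String), Dom_solve s → Pre_solve s → Spec_solve s (solve s)

-- ===== LEMMAS AND PROOFS =====

def vB (c : Char) : Bool := ['a','e','i','o','u'].contains c

-- named forms of the two ports' loop bodies (rfl-equal up to the vowel test)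
def stepA (cur : List Char) (letter : Char) : List Char :=
  if vB letter then PySem.Chars.replace cur [letter] ['*'] else cur

def stepF (st : Int × Int) (c : Char) : Int × Int :=
  let total := st.2 + ((c.toNat : Int) - 96)
  (if total > st.1 then total else st.1, total)

def stepB (st : Int × Int) (ch : Char) : Int × Int :=
  if vB ch then (st.1, 0) else stepF st ch

-- `ch in vowels` on single chars is membership
theorem isIn_singleton (c : Char) (l : List Char) :
    PySem.Chars.isIn [c] l = l.contains c := by
  by_cases h2 : c ∈ l
  · have h : [c] <:+: l := by
      rcases List.mem_iff_append.mp h2 with ⟨p, q, hpq⟩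
      exact ⟨p, q, by simp [hpq]⟩
    rw [(PySem.Chars.isIn_iff_infix _ _).mpr h]
    simp [h2]
  · have h : ¬ [c] <:+: l := by
      intro h
      rcases h with ⟨p, q, hpq⟩
      exact h2 (by subst hpq; simp)
    rw [(PySem.Chars.isIn_eq_false_iff _ _).mpr h]
    simp [h2]

theorem isIn_vowels (c : Char) : PySem.Chars.isIn [c] "aeiou".toList = vB c := by
  rw [isIn_singleton]; rfl

theorem stepA_eq :
    (fun cur letter =>
        if PySem.Chars.isIn [letter] "aeiou".toList
        then PySem.Chars.replace cur [letter] ['*'] else cur) = stepA := by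
  funext cur letter
  simp only [isIn_vowels, stepA]

theorem stepB_eq :
    (fun (st : Int × Int) ch =>
        if PySem.Chars.isIn [ch] "aeiou".toList then (st.1, 0)
        else
          let total := st.2 + ((ch.toNat : Int) - 96)
          (if total > st.1 then total else st.1, total)) = stepB := by
  funext st ch
  simp only [isIn_vowels, stepB, stepF]

-- single-character replace is a map
theorem replace_go_spec (a b : Char) :
    ∀ (fuel : Nat) (l acc : List Char), l.length ≤ fuel →
      PySem.Chars.replace.go [a] [b] fuel l acc
        = acc.reverse ++ l.map (fun c => if c = a then b else c) := by
  intro fuel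
  induction fuel with
  | zero =>
    intro l acc hl
    have : l = [] := by cases l <;> simp_all
    subst this
    simp [PySem.Chars.replace.go]
  | succ n ih =>
    intro l acc hl
    cases l with
    | nil => simp [PySem.Chars.replace.go]
    | cons c t =>
      simp only [PySem.Chars.replace.go]
      by_cases hca : a = c
      · subst hca
        rw [if_pos (by simp [List.isPrefixOf])]
        rw [show List.drop [a].length (a :: t) = t from rfl]
        rw [ih t _ (by simpa using Nat.le_of_succ_le_succ hl)]
        simp
      · rw [if_neg (by
          simp [List.isPrefixOf]
          intro h
          exact hca h)]
        rw [ih t (c :: acc) (by simpa using Nat.le_of_succ_le_succ hl)]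
        have hac : ¬ c = a := fun h => hca h.symm
        simp [hac]

theorem replace_single (a b : Char) (l : List Char) :
    PySem.Chars.replace l [a] [b] = l.map (fun c => if c = a then b else c) := by
  simp only [PySem.Chars.replace]
  rw [if_neg (by simp)]
  rw [replace_go_spec a b l.length l [] le_rfl]
  simp

-- reference split on '*', packaged as (first segment, remaining segments)
def splitStarP : List Char → List Char × List (List Char)
  | [] => ([], [])
  | c :: t =>
      if c = '*' then ([], (splitStarP t).1 :: (splitStarP t).2)
      else (c :: (splitStarP t).1, (splitStarP t).2)

theorem splitStarP_star (t : List Char) :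
    splitStarP ('*' :: t) = ([], (splitStarP t).1 :: (splitStarP t).2) := by
  simp [splitStarP]

theorem splitStarP_cons (c : Char) (t : List Char) (h : ¬ c = '*') :
    splitStarP (c :: t) = (c :: (splitStarP t).1, (splitStarP t).2) := by
  simp [splitStarP, h]

theorem splitOn_go_spec :
    ∀ (fuel : Nat) (l cur : List Char) (acc : List (List Char)), l.length ≤ fuel →
      PySem.Chars.splitOn.go ['*'] fuel l cur acc
        = acc.reverse ++ ((cur.reverse ++ (splitStarP l).1) :: (splitStarP l).2) := by
  intro fuel
  induction fuel with
  | zero =>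
    intro l cur acc hl
    have : l = [] := by cases l <;> simp_all
    subst this
    simp [PySem.Chars.splitOn.go, splitStarP]
  | succ n ih =>
    intro l cur acc hl
    cases l with
    | nil => simp [PySem.Chars.splitOn.go, splitStarP]
    | cons c t =>
      simp only [PySem.Chars.splitOn.go]
      by_cases hc : c = '*'
      · subst hc
        rw [if_pos (by simp [List.isPrefixOf])]
        rw [show List.drop ['*'].length ('*' :: t) = t from rfl]
        rw [ih t [] _ (by simpa using Nat.le_of_succ_le_succ hl)]
        rw [splitStarP_star]
        simp
      · rw [if_neg (by
          simp [List.isPrefixOf]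
          intro h
          first | exact hc h | exact hc h.symm)]
        rw [ih t (c :: cur) acc (by simpa using Nat.le_of_succ_le_succ hl)]
        rw [splitStarP_cons c t hc]
        simp

theorem splitOn_star (l : List Char) :
    PySem.Chars.splitOn l ['*'] = (splitStarP l).1 :: (splitStarP l).2 := by
  simp only [PySem.Chars.splitOn]
  rw [splitOn_go_spec (l.length + 1) l [] [] (by omega)]
  simp

-- the vowel-replacement loop turns every vowel of the original string into '*'
def fRepl (seen : List Char) (c : Char) : Char :=
  if vB c && seen.contains c then '*' else c

theorem loop_inv (todo : List Char) :
    ∀ (L seen : List Char),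
      todo.foldl stepA (L.map (fRepl seen)) = L.map (fRepl (seen ++ todo)) := by
  induction todo with
  | nil => intro L seen; simp
  | cons x rest ih =>
    intro L seen
    simp only [List.foldl_cons]
    by_cases hx : vB x = true
    · rw [show stepA (L.map (fRepl seen)) x
            = PySem.Chars.replace (L.map (fRepl seen)) [x] ['*'] from by simp [stepA, hx]]
      have hxs : ¬ x = '*' := by
        intro h; subst h; simp [vB] at hx
      rw [replace_single, List.map_map]
      have key : ((fun c => if c = x then '*' else c) ∘ fRepl seen) = fRepl (seen ++ [x]) := by
        funext c
        by_cases h1 : vB c = true <;> by_cases h2 : c ∈ seen <;> by_cases h3 : c = x <;>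
          simp_all [fRepl, Function.comp]
      rw [key, ih L (seen ++ [x]), List.append_assoc]
      rfl
    · rw [show stepA (L.map (fRepl seen)) x = L.map (fRepl seen) from by simp [stepA, hx]]
      have key : fRepl seen = fRepl (seen ++ [x]) := by
        funext c
        by_cases h1 : vB c = true <;> by_cases h2 : c ∈ seen <;> by_cases h3 : c = x <;>
          simp_all [fRepl]
      rw [key, ih L (seen ++ [x]), List.append_assoc]
      rfl

def starV (c : Char) : Char := if vB c then '*' else c

theorem loop_result (L : List Char) :
    L.foldl stepA L = L.map starV := by
  have h0 : L.map (fRepl []) = L := by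
    have hid : fRepl [] = id := by funext c; simp [fRepl]
    rw [hid, List.map_id]
  have h := loop_inv L L []
  rw [h0] at h
  rw [h]
  apply List.map_congr_left
  intro c hc
  simp [fRepl, starV, hc]

-- B's inner accumulation (best, total) over a segment free of separators
def cf (b t : Int) (seg : List Char) : Int :=
  (seg.foldl stepF (b, t)).1

theorem counts_eq_cf (seg : List Char) : ∀ (t b : Int),
    (seg.foldl (fun (st : Int × Int) c =>
        let total := st.1 + ((c.toNat : Int) - 96)
        (total, if total > st.2 then total else st.2)) (t, b)).2 = cf b t seg := by
  induction seg with
  | nil => intro t b; simp [cf]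
  | cons c s ih =>
    intro t b
    simp only [cf, List.foldl_cons, stepF] at *
    exact ih _ _

theorem cf_max (seg : List Char) : ∀ (b b' t : Int),
    cf (max b b') t seg = max b (cf b' t seg) := by
  induction seg with
  | nil => intro b b' t; simp [cf]
  | cons c s ih =>
    intro b b' t
    simp only [cf, List.foldl_cons, stepF] at *
    have h1 : (if t + ((c.toNat : Int) - 96) > max b b' then t + ((c.toNat : Int) - 96) else max b b')
        = max b (if t + ((c.toNat : Int) - 96) > b' then t + ((c.toNat : Int) - 96) else b') := by
      split <;> split <;> omega
    rw [h1, ih]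

-- main invariant: B's fold from state (b, t), 0 ≤ b, computes A's segment-wise maximum
theorem main_inv (L : List Char) :
    ∀ (b t : Int), 0 ≤ b → (∀ c ∈ L, ¬ c = '*') →
      (L.foldl stepB (b, t)).1
        = (splitStarP (L.map starV)).2.foldl
            (fun acc seg => max acc (cf 0 0 seg)) (cf b t (splitStarP (L.map starV)).1) := by
  induction L with
  | nil => intro b t hb hstar; simp [splitStarP, cf]
  | cons c L ih =>
    intro b t hb hstar
    simp only [List.foldl_cons, List.map_cons]
    by_cases hc : vB c = true
    · rw [show stepB (b, t) c = (b, 0) from by simp [stepB, hc]]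
      rw [show starV c = '*' from by simp [starV, hc]]
      rw [splitStarP_star]
      rw [ih b 0 hb (fun x hx => hstar x (List.mem_cons_of_mem _ hx))]
      simp only [List.foldl_cons]
      congr 1
      have h1 : cf b 0 (splitStarP (L.map starV)).1
          = max b (cf 0 0 (splitStarP (L.map starV)).1) := by
        have h2 := cf_max (splitStarP (L.map starV)).1 b 0 0
        rwa [max_eq_left hb] at h2
      rw [h1]
      simp [cf]
    · rw [show stepB (b, t) c = stepF (b, t) c from by simp [stepB, hc]]
      rw [show starV c = c from by simp [starV, hc]]
      rw [splitStarP_cons c _ (hstar c (List.mem_cons_self ..))]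
      simp only []
      rw [show stepF (b, t) c
            = (if t + ((c.toNat : Int) - 96) > b then t + ((c.toNat : Int) - 96) else b,
               t + ((c.toNat : Int) - 96)) from by simp [stepF]]
      rw [ih (if t + ((c.toNat : Int) - 96) > b then t + ((c.toNat : Int) - 96) else b)
            (t + ((c.toNat : Int) - 96))
            (by split <;> omega)
            (fun x hx => hstar x (List.mem_cons_of_mem _ hx))]
      congr 1

theorem solve_eq (s : String) (hpre : ¬ '*' ∈ s.toList) : solve s = solve_alt s := by
  simp only [solve, solve_alt]
  rw [stepA_eq, stepB_eq]
  rw [loop_result, splitOn_star]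
  simp only [List.map_cons]
  rw [PySem.List.max?_id_cons, List.foldl_map]
  have hsc : solveCounts = fun seg => cf 0 0 seg := by
    funext seg
    simp only [solveCounts]
    exact counts_eq_cf seg 0 0
  rw [hsc]
  have hstar : ∀ c ∈ s.toList, ¬ c = '*' := fun c hc he => hpre (he ▸ hc)
  rw [main_inv s.toList 0 0 le_rfl hstar]

-- ===== VERDICT (by name: the statement is the Claim_ definition above) =====
theorem solve_spec : Claim_equal_solve := by
  intro s _ hpre
  unfold Spec_solve
  exact solve_eq s hpre
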